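-- pv_equiv track=rewrite | github.com/hugocondesa-debug/portfolio-thesis-engine | src/portfolio_thesis_engine/pipeline/coordinator.py | _parse_period_label
-- ===== SOURCE A (Python) =====
-- _PERIOD_QUALIFIERS: frozenset[str] = frozenset(
--     {"preliminary", "audited", "reviewed", "unaudited"}
-- )
--
-- def _parse_period_label(label: str) -> tuple[str, str | None]:
--     """Split an explicit ``--base-period`` label into ``(base, qualifier)``.
--
--     Examples::
--
--         FY2024              → ("FY2024", None)
--         FY2025-preliminary  → ("FY2025", "preliminary")
--         H1_2025             → ("H1_2025", None)
--         FY2024-audited      → ("FY2024", "audited")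
--
--     Only the suffixes in :data:`_PERIOD_QUALIFIERS` are treated as
--     qualifiers; everything else stays part of the base. Preserves the
--     caller's casing so downstream matches honour ``FY`` / ``H1`` etc.
--     """
--     lowered = label.lower()
--     for qualifier in _PERIOD_QUALIFIERS:
--         suffix = f"-{qualifier}"
--         if lowered.endswith(suffix):
--             base = label[: -len(suffix)]
--             return base, qualifier
--     return label, None
-- ===== SOURCE B (Python) =====
-- _PERIOD_QUALIFIERS: frozenset[str] = frozenset(
--     {"preliminary", "audited", "reviewed", "unaudited"}
-- )
--
--
-- def _parse_period_label(label: str) -> tuple[str, str | None]: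
--     """Split label once at its last dash; recognise a qualifier tail."""
--     head, sep, tail = label.rpartition("-")
--     if sep:
--         qualifier = tail.lower()
--         if qualifier in _PERIOD_QUALIFIERS:
--             return head, qualifier
--     return label, None
-- ===== Notes on version B (the rewrite author's own statement) =====
-- stated objective: simpler
-- what changed: Replaces the loop over all four qualifier suffixes with a single rpartition at the last dash plus one set-membership test on the lowercased tail.
import Mathlib
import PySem

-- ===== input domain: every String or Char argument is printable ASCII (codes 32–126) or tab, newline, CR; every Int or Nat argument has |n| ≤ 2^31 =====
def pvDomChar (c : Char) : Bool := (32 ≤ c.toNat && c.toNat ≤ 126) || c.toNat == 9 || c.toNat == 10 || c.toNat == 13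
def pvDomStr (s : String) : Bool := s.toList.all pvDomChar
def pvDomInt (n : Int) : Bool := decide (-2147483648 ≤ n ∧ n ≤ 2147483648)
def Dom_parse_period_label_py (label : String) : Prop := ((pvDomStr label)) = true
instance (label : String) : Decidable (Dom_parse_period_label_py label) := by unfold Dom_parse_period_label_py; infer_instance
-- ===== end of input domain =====

-- B replaces A's scan over the four "-qualifier" suffixes by one split at the label's
-- last dash plus a single membership test on the lowercased tail (objective: simpler).

-- the module constant _PERIOD_QUALIFIERS (shared by both Pythons)
def pvQualifiers : List (List Char) :=
  ["preliminary".toList, "audited".toList, "reviewed".toList, "unaudited".toList]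

-- ===== PORT A =====
-- A's for-loop over the frozenset; the iteration order used here is the literal-source
-- order — no label can end in two distinct "-qualifier" suffixes, so order cannot matter.
def pvAGo (label lowered : List Char) : List (List Char) → List Char × Option (List Char)
  | [] => (label, none)
  | q :: rest =>
    let suffix := '-' :: q                                        -- f"-{qualifier}"
    if PySem.Chars.endswith lowered suffix then
      (PySem.Chars.slice label none (some (-(suffix.length : Int))), some q)  -- label[:-len(suffix)]
    else pvAGo label lowered rest

def parse_period_label_py (label : String) : String × Option String :=
  let r := pvAGo label.toList (PySem.Chars.lower label.toList) pvQualifiers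
  (String.ofList r.1, r.2.map String.ofList)

-- ===== PORT B =====
-- hand port of str.rpartition("-") for the single-char separator: splits at the LAST
-- occurrence; none is exactly Python's separator-absent ('', '', s) case (exact)
def pvRpartGo (c : Char) : List Char → Option (List Char × List Char)
  | [] => none
  | x :: xs =>
    match pvRpartGo c xs with
    | some (h, t) => some (x :: h, t)
    | none => if x = c then some ([], xs) else none

def parse_period_label_py_alt (label : String) : String × Option String :=
  match pvRpartGo '-' label.toList with
  | none => (label, none)                                         -- sep == ''
  | some (h, t) =>
    let q := PySem.Chars.lower t                                  -- tail.lower()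
    if q ∈ pvQualifiers then (String.ofList h, some (String.ofList q))
    else (label, none)

-- ===== PRECONDITION & SPEC =====
def Spec_parse_period_label_py (label : String) (out : String × Option String) : Prop := out = parse_period_label_py_alt label
instance (label : String) (out : String × Option String) : Decidable (Spec_parse_period_label_py label out) := by unfold Spec_parse_period_label_py; infer_instance

-- ===== CLAIM (what is proved, stated in full; the proofs are below) =====
def Claim_equal_parse_period_label_py : Prop := ∀ (label : String), Dom_parse_period_label_py label → Spec_parse_period_label_py label (parse_period_label_py label)

-- ===== LEMMAS AND PROOFS =====

theorem pvCharOfNat_toNat (n : Nat) (h : n.isValidChar) : (Char.ofNat n).toNat = n := by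
  simp [Char.ofNat, Char.ofNatAux, h, Char.toNat]

theorem pvLowerChar_eq_dash {c : Char} (h : PySem.Chars.lowerChar c = '-') : c = '-' := by
  unfold PySem.Chars.lowerChar PySem.Chars.isupper at h
  split_ifs at h with hu
  · exfalso
    simp only [Bool.and_eq_true, decide_eq_true_eq] at hu
    have h1 : 65 ≤ c.toNat := Nat.succ_le_of_lt hu.1
    have h2 : c.toNat ≤ 90 := Fin.mk_le_mk.mp hu.2
    have hv : (c.toNat + 32).isValidChar := Or.inl (by omega)
    have h3 := congrArg Char.toNat h
    rw [pvCharOfNat_toNat _ hv] at h3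
    have h4 : ('-').toNat = 45 := by decide
    omega
  · exact h

theorem pvDash_notMem_lower {t : List Char} (h : '-' ∉ t) : '-' ∉ PySem.Chars.lower t := by
  intro hm
  unfold PySem.Chars.lower at hm
  obtain ⟨c, hc, hlc⟩ := List.mem_map.mp hm
  exact h (pvLowerChar_eq_dash hlc ▸ hc)

-- endswith on the lowered label, characterised at the last-dash split of the label
theorem pvEndswith_iff {h t q : List Char} (ht : '-' ∉ t) (hq : '-' ∉ q) :
    PySem.Chars.endswith (PySem.Chars.lower (h ++ '-' :: t)) ('-' :: q) = true ↔
      PySem.Chars.lower t = q := by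
  have hlt : '-' ∉ PySem.Chars.lower t := pvDash_notMem_lower ht
  have hsplit : PySem.Chars.lower (h ++ '-' :: t)
      = PySem.Chars.lower h ++ '-' :: PySem.Chars.lower t := by
    unfold PySem.Chars.lower PySem.Chars.lowerChar PySem.Chars.isupper
    simp
  rw [PySem.Chars.endswith_iff, hsplit]
  constructor
  · intro hsuf
    have hsuf2 : ('-' :: PySem.Chars.lower t) <:+ PySem.Chars.lower h ++ '-' :: PySem.Chars.lower t :=
      List.suffix_append _ _
    rcases List.suffix_or_suffix_of_suffix hsuf hsuf2 with hc | hc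
    · rcases List.suffix_cons_iff.mp hc with heq | hc'
      · exact (List.cons_eq_cons.mp heq).2.symm
      · exact absurd (hc'.subset (List.mem_cons_self)) hlt
    · rcases List.suffix_cons_iff.mp hc with heq | hc'
      · exact (List.cons_eq_cons.mp heq).2
      · exact absurd (hc'.subset (List.mem_cons_self)) hq
  · intro hqe
    exact hqe ▸ List.suffix_append _ _

theorem pvEndswith_false {s q : List Char} (hs : '-' ∉ s) :
    PySem.Chars.endswith (PySem.Chars.lower s) ('-' :: q) = false := by
  rw [Bool.eq_false_iff]
  intro hc
  have := (PySem.Chars.endswith_iff _ _).mp hc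
  exact pvDash_notMem_lower hs (this.subset List.mem_cons_self)

-- pvRpartGo finds the last occurrence
theorem pvRpartGo_none {c : Char} {s : List Char} (h : pvRpartGo c s = none) : c ∉ s := by
  induction s with
  | nil => simp
  | cons x xs ih =>
    unfold pvRpartGo at h
    rcases hr : pvRpartGo c xs with _ | ⟨hh, tt⟩
    · rw [hr] at h
      split_ifs at h with hx
      simp [List.mem_cons, ih hr]
      intro hcx
      exact hx hcx.symm
    · rw [hr] at h; simp at h

theorem pvRpartGo_some {c : Char} {s h t : List Char} (hr : pvRpartGo c s = some (h, t)) :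
    s = h ++ c :: t ∧ c ∉ t := by
  induction s generalizing h t with
  | nil => simp [pvRpartGo] at hr
  | cons x xs ih =>
    unfold pvRpartGo at hr
    rcases hx : pvRpartGo c xs with _ | ⟨hh, tt⟩
    · rw [hx] at hr
      split_ifs at hr with hxc
      injection hr with hr'
      injection hr' with h1 h2
      subst h1; subst h2; subst hxc
      exact ⟨rfl, pvRpartGo_none hx⟩
    · rw [hx] at hr
      injection hr with hr'
      injection hr' with h1 h2
      obtain ⟨hs, hnt⟩ := ih hx
      subst h1; subst h2; subst hs
      exact ⟨rfl, hnt⟩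

-- A's slice label[:-len('-q')] at the last-dash split is the head
theorem pvSlice_head (h t : List Char) :
    PySem.Chars.slice (h ++ '-' :: t) none (some (-(((t.length : Nat) + 1 : Nat) : Int))) = h := by
  unfold PySem.Chars.slice PySem.List.slice PySem.List.clampIdx
  have hlen : (h ++ '-' :: t).length = h.length + t.length + 1 := by simp; omega
  rw [hlen]
  have h1 : ¬ ((0:Int) < 0) := by omega
  have h2 : ((h.length + t.length + 1 : Nat) : Int) + -(((t.length + 1 : Nat) : Int)) = (h.length : Int) := by
    push_cast; ring
  simp only [show -(((t.length + 1 : Nat) : Int)) < 0 by push_cast; omega, if_true, h2]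
  have h3 : ¬ ((h.length : Int) < 0) := by omega
  simp only [if_false, h3]
  simp [List.take_left']

theorem pvMain (label : String) :
    parse_period_label_py label = parse_period_label_py_alt label := by
  unfold parse_period_label_py parse_period_label_py_alt
  rcases hr : pvRpartGo '-' label.toList with _ | ⟨h, t⟩
  · have hnd : '-' ∉ label.toList := pvRpartGo_none hr
    simp only [pvQualifiers, pvAGo, pvEndswith_false hnd, Bool.false_eq_true, if_false,
      Option.map_none, String.ofList_toList]
  · obtain ⟨hs, hnt⟩ := pvRpartGo_some hr
    have key : ∀ q : List Char, '-' ∉ q →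
        (PySem.Chars.endswith (PySem.Chars.lower label.toList) ('-' :: q) = true ↔
          PySem.Chars.lower t = q) := fun q hq => hs ▸ pvEndswith_iff hnt hq
    have hsl : ∀ q : List Char, q.length = t.length →
        PySem.Chars.slice label.toList none (some (-(('-' :: q).length : Int))) = h := by
      intro q hql
      rw [hs]
      have : (('-' :: q).length : Int) = (((t.length : Nat) + 1 : Nat) : Int) := by
        simp [hql]
      rw [this]
      exact pvSlice_head h t
    by_cases h1 : PySem.Chars.lower t = "preliminary".toList
    · have he := (key "preliminary".toList (by decide)).mpr h1
      have hlen : ("preliminary".toList).length = t.length := by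
        rw [← h1]; simp [PySem.Chars.lower]
      simp only [pvQualifiers, pvAGo, he, if_true, hsl _ hlen, h1, List.mem_cons]
      simp
    · by_cases h2 : PySem.Chars.lower t = "audited".toList
      · have he := (key "audited".toList (by decide)).mpr h2
        have hne := (key "preliminary".toList (by decide))
        have hf : PySem.Chars.endswith (PySem.Chars.lower label.toList) ('-' :: "preliminary".toList) = false := by
          rw [Bool.eq_false_iff]; intro hc; exact h1 (hne.mp hc)
        have hlen : ("audited".toList).length = t.length := by
          rw [← h2]; simp [PySem.Chars.lower]
        simp only [pvQualifiers, pvAGo, hf, he, Bool.false_eq_true, if_false, if_true,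
          hsl _ hlen, h2]
        simp
      · by_cases h3 : PySem.Chars.lower t = "reviewed".toList
        · have he := (key "reviewed".toList (by decide)).mpr h3
          have hf1 : PySem.Chars.endswith (PySem.Chars.lower label.toList) ('-' :: "preliminary".toList) = false := by
            rw [Bool.eq_false_iff]; intro hc; exact h1 ((key _ (by decide)).mp hc)
          have hf2 : PySem.Chars.endswith (PySem.Chars.lower label.toList) ('-' :: "audited".toList) = false := by
            rw [Bool.eq_false_iff]; intro hc; exact h2 ((key _ (by decide)).mp hc)
          have hlen : ("reviewed".toList).length = t.length := by
            rw [← h3]; simp [PySem.Chars.lower]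
          simp only [pvQualifiers, pvAGo, hf1, hf2, he, Bool.false_eq_true, if_false, if_true,
            hsl _ hlen, h3]
          simp
        · by_cases h4 : PySem.Chars.lower t = "unaudited".toList
          · have he := (key "unaudited".toList (by decide)).mpr h4
            have hf1 : PySem.Chars.endswith (PySem.Chars.lower label.toList) ('-' :: "preliminary".toList) = false := by
              rw [Bool.eq_false_iff]; intro hc; exact h1 ((key _ (by decide)).mp hc)
            have hf2 : PySem.Chars.endswith (PySem.Chars.lower label.toList) ('-' :: "audited".toList) = false := by
              rw [Bool.eq_false_iff]; intro hc; exact h2 ((key _ (by decide)).mp hc)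
            have hf3 : PySem.Chars.endswith (PySem.Chars.lower label.toList) ('-' :: "reviewed".toList) = false := by
              rw [Bool.eq_false_iff]; intro hc; exact h3 ((key _ (by decide)).mp hc)
            have hlen : ("unaudited".toList).length = t.length := by
              rw [← h4]; simp [PySem.Chars.lower]
            simp only [pvQualifiers, pvAGo, hf1, hf2, hf3, he, Bool.false_eq_true, if_false,
              if_true, hsl _ hlen, h4]
            simp
          · have hf1 : PySem.Chars.endswith (PySem.Chars.lower label.toList) ('-' :: "preliminary".toList) = false := by
              rw [Bool.eq_false_iff]; intro hc; exact h1 ((key _ (by decide)).mp hc)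
            have hf2 : PySem.Chars.endswith (PySem.Chars.lower label.toList) ('-' :: "audited".toList) = false := by
              rw [Bool.eq_false_iff]; intro hc; exact h2 ((key _ (by decide)).mp hc)
            have hf3 : PySem.Chars.endswith (PySem.Chars.lower label.toList) ('-' :: "reviewed".toList) = false := by
              rw [Bool.eq_false_iff]; intro hc; exact h3 ((key _ (by decide)).mp hc)
            have hf4 : PySem.Chars.endswith (PySem.Chars.lower label.toList) ('-' :: "unaudited".toList) = false := by
              rw [Bool.eq_false_iff]; intro hc; exact h4 ((key _ (by decide)).mp hc)
            simp only [pvQualifiers, pvAGo, hf1, hf2, hf3, hf4, Bool.false_eq_true, if_false]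
            rw [if_neg (by intro hm; rcases (by simpa using hm : _ ∨ _ ∨ _ ∨ _) with hm | hm | hm | hm <;> simp_all)]
            simp [String.ofList_toList]

-- ===== VERDICT (by name: the statement is the Claim_ definition above) =====
theorem parse_period_label_py_spec : Claim_equal_parse_period_label_py := by
  intro label _
  unfold Spec_parse_period_label_py
  exact pvMain label
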